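-- pv_equiv track=rewrite | github.com/RajTib/Social-Event-Hub | backend/app.py | map_event_category
-- ===== SOURCE A (Python) =====
-- def map_event_category(serpapi_type: str, title: str) -> str:
--     serpapi_type = (serpapi_type or "").lower()
--     title = (title or "").lower()
--     if any(k in serpapi_type for k in ["concert", "music", "gig"]) or "music" in title:
--         return "music"
--     elif any(k in serpapi_type for k in ["art", "exhibition", "gallery"]) or "art" in title:
--         return "art"
--     elif any(k in serpapi_type for k in ["workshop", "class", "training"]) or "workshop" in title:
--         return "workshop"
--     elif any(k in serpapi_type for k in ["meetup", "network", "community"]) or "meetup" in title: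
--         return "meetup"
--     elif any(k in serpapi_type for k in ["sports", "game", "tournament"]) or "sports" in title:
--         return "sports"
--     elif "date" in serpapi_type or "date" in title:
--         return "date"
--     elif "comedy" in serpapi_type or "comedy" in title:
--         return "comedy"
--     else:
--         return "general"
-- ===== SOURCE B (Python) =====
-- _TYPE_KEYWORD_CATEGORY = {
--     "concert": "music", "music": "music", "gig": "music",
--     "art": "art", "exhibition": "art", "gallery": "art",
--     "workshop": "workshop", "class": "workshop", "training": "workshop",
--     "meetup": "meetup", "network": "meetup", "community": "meetup",
--     "sports": "sports", "game": "sports", "tournament": "sports",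
--     "date": "date", "comedy": "comedy",
-- }
-- _PRIORITY = {"music": 0, "art": 1, "workshop": 2, "meetup": 3,
--              "sports": 4, "date": 5, "comedy": 6}
--
-- def map_event_category(serpapi_type: str, title: str) -> str:
--     s = (serpapi_type or "").lower()
--     t = (title or "").lower()
--     # collect every matching category, then pick the highest-priority one
--     hits = [c for k, c in _TYPE_KEYWORD_CATEGORY.items() if k in s]
--     hits += [c for c in _PRIORITY if c in t]
--     return min(hits, key=lambda c: _PRIORITY[c], default="general")
-- ===== Notes on version B (the rewrite author's own statement) =====
-- stated objective: alternative
-- what changed: Instead of A's first-match if/elif chain with early return, B collects ALL matching categories (via a flat keyword-to-category map plus title scan) and then selects the best one with min() under a numeric priority ranking.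
import Mathlib
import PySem

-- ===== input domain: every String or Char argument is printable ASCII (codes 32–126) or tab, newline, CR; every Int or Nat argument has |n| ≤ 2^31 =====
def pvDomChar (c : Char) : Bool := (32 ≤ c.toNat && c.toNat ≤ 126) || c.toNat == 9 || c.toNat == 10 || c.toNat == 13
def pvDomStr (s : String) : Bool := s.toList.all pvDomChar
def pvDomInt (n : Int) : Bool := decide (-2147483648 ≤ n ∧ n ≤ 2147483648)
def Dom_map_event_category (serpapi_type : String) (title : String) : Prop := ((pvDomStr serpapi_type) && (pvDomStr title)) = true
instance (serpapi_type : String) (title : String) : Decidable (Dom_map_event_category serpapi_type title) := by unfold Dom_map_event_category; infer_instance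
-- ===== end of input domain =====

-- B replaces A's first-match if/elif chain by a collect-all-matches pass followed by
-- min() under a numeric priority ranking (objective: alternative).

-- ===== PORT A =====
def map_event_category (serpapi_type : String) (title : String) : String :=
  let s := PySem.Str.lower serpapi_type
  let t := PySem.Str.lower title
  if (["concert", "music", "gig"].any (fun k => PySem.Str.isIn k s)) || PySem.Str.isIn "music" t then "music"
  else if (["art", "exhibition", "gallery"].any (fun k => PySem.Str.isIn k s)) || PySem.Str.isIn "art" t then "art"
  else if (["workshop", "class", "training"].any (fun k => PySem.Str.isIn k s)) || PySem.Str.isIn "workshop" t then "workshop"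
  else if (["meetup", "network", "community"].any (fun k => PySem.Str.isIn k s)) || PySem.Str.isIn "meetup" t then "meetup"
  else if (["sports", "game", "tournament"].any (fun k => PySem.Str.isIn k s)) || PySem.Str.isIn "sports" t then "sports"
  else if PySem.Str.isIn "date" s || PySem.Str.isIn "date" t then "date"
  else if PySem.Str.isIn "comedy" s || PySem.Str.isIn "comedy" t then "comedy"
  else "general"

-- ===== PORT B =====
def typeKeywordCategory : List (String × String) :=
  [("concert", "music"), ("music", "music"), ("gig", "music"),
   ("art", "art"), ("exhibition", "art"), ("gallery", "art"),
   ("workshop", "workshop"), ("class", "workshop"), ("training", "workshop"),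
   ("meetup", "meetup"), ("network", "meetup"), ("community", "meetup"),
   ("sports", "sports"), ("game", "sports"), ("tournament", "sports"),
   ("date", "date"), ("comedy", "comedy")]

def priorityTable : PySem.Dict String Int :=
  PySem.Dict.ofList
    [("music", 0), ("art", 1), ("workshop", 2), ("meetup", 3),
     ("sports", 4), ("date", 5), ("comedy", 6)]

-- the `hits` list of Source B (every matching category, type keywords first)
def hitsOf (s : String) (t : String) : List String :=
  (typeKeywordCategory.filter (fun kc => PySem.Str.isIn kc.1 s)).map Prod.snd
    ++ (PySem.Dict.keys priorityTable).filter (fun c => PySem.Str.isIn c t)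

def map_event_category_alt (serpapi_type : String) (title : String) : String :=
  -- key = lambda c: _PRIORITY[c]; exact here: every hit is a key of priorityTable, so getD's default is never used
  PySem.List.minD (hitsOf (PySem.Str.lower serpapi_type) (PySem.Str.lower title))
    (fun c => PySem.Dict.getD priorityTable c 0) "general"

-- ===== PRECONDITION & SPEC =====
def Spec_map_event_category (serpapi_type : String) (title : String) (out : String) : Prop := out = map_event_category_alt serpapi_type title
instance (serpapi_type : String) (title : String) (out : String) : Decidable (Spec_map_event_category serpapi_type title out) := by unfold Spec_map_event_category; infer_instance

-- ===== CLAIM (what is proved, stated in full; the proofs are below) =====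
def Claim_equal_map_event_category : Prop := ∀ (serpapi_type : String) (title : String), Dom_map_event_category serpapi_type title → Spec_map_event_category serpapi_type title (map_event_category serpapi_type title)

-- ===== LEMMAS AND PROOFS =====

def pvCats : List String := ["music", "art", "workshop", "meetup", "sports", "date", "comedy"]

lemma keys_priorityTable : PySem.Dict.keys priorityTable = pvCats := by decide

lemma hitsOf_sub (s t : String) : ∀ x ∈ hitsOf s t, x ∈ pvCats := by
  intro x hx
  simp only [hitsOf, typeKeywordCategory, keys_priorityTable,
    List.mem_append, List.mem_map, List.mem_filter, pvCats] at hx ⊢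
  rcases hx with ⟨⟨k, c⟩, hk, rfl⟩ | ⟨hx, _⟩ <;> simp_all
  tauto

lemma mem_hits_music (s t : String) :
    "music" ∈ hitsOf s t ↔ ((["concert", "music", "gig"].any (fun k => PySem.Str.isIn k s)) || PySem.Str.isIn "music" t) = true := by
  simp [hitsOf, typeKeywordCategory, keys_priorityTable, pvCats,
    List.mem_filter, List.mem_map]

lemma mem_hits_art (s t : String) :
    "art" ∈ hitsOf s t ↔ ((["art", "exhibition", "gallery"].any (fun k => PySem.Str.isIn k s)) || PySem.Str.isIn "art" t) = true := by
  simp [hitsOf, typeKeywordCategory, keys_priorityTable, pvCats,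
    List.mem_filter, List.mem_map]

lemma mem_hits_workshop (s t : String) :
    "workshop" ∈ hitsOf s t ↔ ((["workshop", "class", "training"].any (fun k => PySem.Str.isIn k s)) || PySem.Str.isIn "workshop" t) = true := by
  simp [hitsOf, typeKeywordCategory, keys_priorityTable, pvCats,
    List.mem_filter, List.mem_map]

lemma mem_hits_meetup (s t : String) :
    "meetup" ∈ hitsOf s t ↔ ((["meetup", "network", "community"].any (fun k => PySem.Str.isIn k s)) || PySem.Str.isIn "meetup" t) = true := by
  simp [hitsOf, typeKeywordCategory, keys_priorityTable, pvCats,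
    List.mem_filter, List.mem_map]

lemma mem_hits_sports (s t : String) :
    "sports" ∈ hitsOf s t ↔ ((["sports", "game", "tournament"].any (fun k => PySem.Str.isIn k s)) || PySem.Str.isIn "sports" t) = true := by
  simp [hitsOf, typeKeywordCategory, keys_priorityTable, pvCats,
    List.mem_filter, List.mem_map]

lemma mem_hits_date (s t : String) :
    "date" ∈ hitsOf s t ↔ (PySem.Str.isIn "date" s || PySem.Str.isIn "date" t) = true := by
  simp [hitsOf, typeKeywordCategory, keys_priorityTable, pvCats,
    List.mem_filter, List.mem_map]

lemma mem_hits_comedy (s t : String) :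
    "comedy" ∈ hitsOf s t ↔ (PySem.Str.isIn "comedy" s || PySem.Str.isIn "comedy" t) = true := by
  simp [hitsOf, typeKeywordCategory, keys_priorityTable, pvCats,
    List.mem_filter, List.mem_map]

-- if c is a hit of minimal priority and priorities identify categories, min-by-priority returns c
lemma pv_min_eq (hits : List String) (hsub : ∀ x ∈ hits, x ∈ pvCats) (c : String) (hc : c ∈ hits)
    (hmin : ∀ x ∈ hits, PySem.Dict.getD priorityTable c 0 ≤ PySem.Dict.getD priorityTable x 0)
    (huniq : ∀ x ∈ pvCats, PySem.Dict.getD priorityTable x 0 = PySem.Dict.getD priorityTable c 0 → x = c) :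
    PySem.List.minD hits (fun c => PySem.Dict.getD priorityTable c 0) "general" = c := by
  rcases e : PySem.List.min? hits (fun c => PySem.Dict.getD priorityTable c 0) with _ | m
  · rw [PySem.List.min?_eq_none_iff] at e
    subst e
    cases hc
  · have hm := PySem.List.min?_mem e
    have hle := PySem.List.min?_isMin e c hc
    have heq := huniq m (hsub m hm) (le_antisymm hle (hmin m hm))
    simp [PySem.List.minD, e, heq]

-- min-by-priority over a list of categories equals the first-match chain on memberships
lemma minD_chain (hits : List String) (hsub : ∀ x ∈ hits, x ∈ pvCats) :
    PySem.List.minD hits (fun c => PySem.Dict.getD priorityTable c 0) "general" =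
      (if "music" ∈ hits then "music"
       else if "art" ∈ hits then "art"
       else if "workshop" ∈ hits then "workshop"
       else if "meetup" ∈ hits then "meetup"
       else if "sports" ∈ hits then "sports"
       else if "date" ∈ hits then "date"
       else if "comedy" ∈ hits then "comedy"
       else "general") := by
  by_cases h1 : "music" ∈ hits
  · rw [if_pos h1]
    refine pv_min_eq hits hsub "music" h1 ?_ (by decide)
    intro x hx
    rcases (by simpa [pvCats] using hsub x hx : _) with rfl | rfl | rfl | rfl | rfl | rfl | rfl <;> decide
  · rw [if_neg h1]
    by_cases h2 : "art" ∈ hits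
    · rw [if_pos h2]
      refine pv_min_eq hits hsub "art" h2 ?_ (by decide)
      intro x hx
      rcases (by simpa [pvCats] using hsub x hx : _) with rfl | rfl | rfl | rfl | rfl | rfl | rfl <;>
        first | decide | exact absurd hx h1
    · rw [if_neg h2]
      by_cases h3 : "workshop" ∈ hits
      · rw [if_pos h3]
        refine pv_min_eq hits hsub "workshop" h3 ?_ (by decide)
        intro x hx
        rcases (by simpa [pvCats] using hsub x hx : _) with rfl | rfl | rfl | rfl | rfl | rfl | rfl <;>
          first | decide | exact absurd hx h1 | exact absurd hx h2
      · rw [if_neg h3]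
        by_cases h4 : "meetup" ∈ hits
        · rw [if_pos h4]
          refine pv_min_eq hits hsub "meetup" h4 ?_ (by decide)
          intro x hx
          rcases (by simpa [pvCats] using hsub x hx : _) with rfl | rfl | rfl | rfl | rfl | rfl | rfl <;>
            first | decide | exact absurd hx h1 | exact absurd hx h2 | exact absurd hx h3
        · rw [if_neg h4]
          by_cases h5 : "sports" ∈ hits
          · rw [if_pos h5]
            refine pv_min_eq hits hsub "sports" h5 ?_ (by decide)
            intro x hx
            rcases (by simpa [pvCats] using hsub x hx : _) with rfl | rfl | rfl | rfl | rfl | rfl | rfl <;>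
              first | decide | exact absurd hx h1 | exact absurd hx h2 | exact absurd hx h3 | exact absurd hx h4
          · rw [if_neg h5]
            by_cases h6 : "date" ∈ hits
            · rw [if_pos h6]
              refine pv_min_eq hits hsub "date" h6 ?_ (by decide)
              intro x hx
              rcases (by simpa [pvCats] using hsub x hx : _) with rfl | rfl | rfl | rfl | rfl | rfl | rfl <;>
                first | decide | exact absurd hx h1 | exact absurd hx h2 | exact absurd hx h3 | exact absurd hx h4 | exact absurd hx h5
            · rw [if_neg h6]
              by_cases h7 : "comedy" ∈ hits
              · rw [if_pos h7]
                refine pv_min_eq hits hsub "comedy" h7 ?_ (by decide)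
                intro x hx
                rcases (by simpa [pvCats] using hsub x hx : _) with rfl | rfl | rfl | rfl | rfl | rfl | rfl <;>
                  first | decide | exact absurd hx h1 | exact absurd hx h2 | exact absurd hx h3 | exact absurd hx h4 | exact absurd hx h5 | exact absurd hx h6
              · rw [if_neg h7]
                have hnil : hits = [] := by
                  refine List.eq_nil_iff_forall_not_mem.mpr ?_
                  intro x hx
                  rcases (by simpa [pvCats] using hsub x hx : _) with rfl | rfl | rfl | rfl | rfl | rfl | rfl <;>
                    first | exact h1 hx | exact h2 hx | exact h3 hx | exact h4 hx | exact h5 hx | exact h6 hx | exact h7 hx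
                subst hnil
                rfl

theorem map_event_category_spec : Claim_equal_map_event_category := by
  intro s0 t0 _
  unfold Spec_map_event_category
  simp only [map_event_category, map_event_category_alt]
  rw [minD_chain _ (hitsOf_sub _ _)]
  simp only [mem_hits_music, mem_hits_art, mem_hits_workshop, mem_hits_meetup,
    mem_hits_sports, mem_hits_date, mem_hits_comedy]
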